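-- pv_equiv track=rewrite | github.com/Nobu0/Haskell-dlist-parser | tool/sqlite_instance.py | parse_instances
-- ===== SOURCE A (Python) =====
-- def parse_instances(info_text):
--     lines = info_text.splitlines()
--     instances = []
--     buffer = None
--
--     for line in lines:
--         line = line.strip()
--
--         # instance の開始行
--         if line.startswith("instance "):
--             # 前の instance を保存
--             if buffer is not None:
--                 instances.append(buffer.strip())
--
--             buffer = line  # 新しい instance 開始
--             continue
--
--         # instance の継続行（括弧が閉じていない）
--         if buffer is not None:
--             # 次の instance が始まるまで結合
--             buffer += " " + line
--             continue
--
--     # 最後の instance を保存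
--     if buffer is not None:
--         instances.append(buffer.strip())
--
--     return instances
-- ===== SOURCE B (Python) =====
-- def parse_instances(info_text):
--     # Staged: strip all lines, find the boundary indices of "instance " lines,
--     # then cut the line list into slices between consecutive boundaries and
--     # join each slice.
--     lines = [l.strip() for l in info_text.splitlines()]
--     starts = [i for i, l in enumerate(lines) if l.startswith("instance ")]
--     ends = starts[1:] + [len(lines)]
--     return [" ".join(lines[s:e]).strip() for s, e in zip(starts, ends)]
-- ===== Notes on version B (the rewrite author's own statement) =====
-- stated objective: simpler
-- what changed: B replaces A's stateful buffer-and-flush loop by a staged computation: strip all lines, collect the indices of 'instance ' boundary lines, and slice-and-join the lines between each pair of consecutive boundaries.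
import Mathlib
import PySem

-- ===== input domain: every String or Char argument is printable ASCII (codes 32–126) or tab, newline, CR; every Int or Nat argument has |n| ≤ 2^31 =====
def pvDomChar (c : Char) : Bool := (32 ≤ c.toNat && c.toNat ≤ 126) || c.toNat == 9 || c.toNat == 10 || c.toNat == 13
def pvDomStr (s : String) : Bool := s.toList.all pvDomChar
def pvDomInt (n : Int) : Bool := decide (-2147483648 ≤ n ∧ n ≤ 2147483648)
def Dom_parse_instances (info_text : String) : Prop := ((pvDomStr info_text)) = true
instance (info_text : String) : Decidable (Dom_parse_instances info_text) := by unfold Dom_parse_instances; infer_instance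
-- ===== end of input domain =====

-- B replaces A's stateful buffer loop by a staged computation: strip every line,
-- collect the indices of "instance " boundary lines, and join the slice between
-- consecutive boundaries (alternative decomposition, same linear cost).

-- ===== PORT A =====
-- one iteration of A's loop: state = (instances, buffer)
def pvStepA (st : List String × Option String) (line0 : String) : List String × Option String :=
  let line := PySem.Str.strip line0
  if PySem.Str.startswith line "instance " then
    match st.2 with
    | some buffer => (st.1 ++ [PySem.Str.strip buffer], some line)
    | none => (st.1, some line)
  else
    match st.2 with
    | some buffer => (st.1, some (buffer ++ " " ++ line))
    | none => st

def parse_instances (info_text : String) : List String :=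
  let st := (PySem.Str.splitlines info_text).foldl pvStepA ([], none)
  match st.2 with
  | some buffer => st.1 ++ [PySem.Str.strip buffer]
  | none => st.1

-- ===== PORT B =====
def parse_instances_alt (info_text : String) : List String :=
  let lines := (PySem.Str.splitlines info_text).map PySem.Str.strip
  let starts := ((PySem.List.enumerate lines 0).filter
      (fun p => PySem.Str.startswith p.2 "instance ")).map (·.1)
  let ends := starts.drop 1 ++ [(lines.length : Int)]
  (starts.zip ends).map (fun p =>
    PySem.Str.strip (PySem.Str.join " " (PySem.List.slice lines (some p.1) (some p.2))))

-- ===== PRECONDITION & SPEC =====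
def Spec_parse_instances (info_text : String) (out : List String) : Prop := out = parse_instances_alt info_text
instance (info_text : String) (out : List String) : Decidable (Spec_parse_instances info_text out) := by unfold Spec_parse_instances; infer_instance

-- ===== CLAIM (what is proved, stated in full; the proofs are below) =====
def Claim_equal_parse_instances : Prop := ∀ (info_text : String), Dom_parse_instances info_text → Spec_parse_instances info_text (parse_instances info_text)

-- ===== LEMMAS AND PROOFS =====

-- proof-only abbreviations
def pvP (l : String) : Bool := PySem.Str.startswith l "instance "
def pvJoin (g : List String) : String := PySem.Str.join " " g
def pvF (g : List String) : String := PySem.Str.strip (pvJoin g)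
-- groups[-1].append(line)
def pvAppendLast (gs : List (List String)) (line : String) : List (List String) :=
  match gs with
  | [] => []
  | [g] => [g ++ [line]]
  | g :: rest => g :: pvAppendLast rest line
-- grouping step on an already-stripped line
def pvG (gs : List (List String)) (line : String) : List (List String) :=
  if pvP line then gs ++ [[line]]
  else if gs.isEmpty then gs
  else pvAppendLast gs line
-- the A-state represented by a group list
def pvState (gs : List (List String)) : List String × Option String :=
  (gs.dropLast.map pvF, gs.getLast?.map pvJoin)
-- A's final flush
def pvFinish (st : List String × Option String) : List String :=
  match st.2 with
  | some buffer => st.1 ++ [PySem.Str.strip buffer]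
  | none => st.1
-- recursive span-grouping: head line plus following non-boundary lines, repeat
def pvBlocks : List String → List (List String)
  | [] => []
  | l :: ls => (l :: ls.takeWhile (fun x => !pvP x)) :: pvBlocks (ls.dropWhile (fun x => !pvP x))
termination_by ls => ls.length
decreasing_by
  have := List.length_dropWhile_le (p := fun x => !pvP x) (l := ls)
  simp only [List.length_cons]; omega
-- boundary indices from offset s
def pvIdx : List String → Int → List Int
  | [], _ => []
  | l :: ls, s => (if pvP l then [s] else []) ++ pvIdx ls (s + 1)

theorem pv_str_ext {s t : String} (h : s.toList = t.toList) : s = t := by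
  rw [← String.ofList_toList (s := s), h, String.ofList_toList]

theorem pv_chars_join_concat (sep q : List Char) :
    ∀ (ps : List (List Char)) (p : List Char),
      PySem.Chars.join sep (p :: (ps ++ [q])) = PySem.Chars.join sep (p :: ps) ++ sep ++ q
  | [], p => by simp [PySem.Chars.join_cons_cons, PySem.Chars.join_singleton]
  | b :: t, p => by
    rw [List.cons_append, PySem.Chars.join_cons_cons, PySem.Chars.join_cons_cons,
      pv_chars_join_concat sep q t b]
    simp [List.append_assoc]

theorem pvJoin_singleton (l : String) : pvJoin [l] = l := by
  simp [pvJoin, PySem.Str.join, PySem.Chars.join_singleton, String.ofList_toList]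

theorem pvJoin_concat (g : List String) (hg : g ≠ []) (l : String) :
    pvJoin (g ++ [l]) = pvJoin g ++ " " ++ l := by
  apply pv_str_ext
  cases g with
  | nil => exact absurd rfl hg
  | cons a t =>
    simp only [pvJoin, PySem.Str.toList_join, String.toList_append, List.map_append,
      List.map_cons, List.map_nil]
    exact pv_chars_join_concat " ".toList l.toList (t.map String.toList) a.toList

theorem pvAppendLast_concat (init : List (List String)) (g : List String) (l : String) :
    pvAppendLast (init ++ [g]) l = init ++ [g ++ [l]] := by
  induction init with
  | nil => rfl
  | cons a t ih =>
    cases t with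
    | nil => simp [pvAppendLast]
    | cons b t' => simpa [pvAppendLast] using ih

theorem pvG_nonempty (gs : List (List String)) (hne : ∀ g ∈ gs, g ≠ []) (line : String) :
    ∀ g ∈ pvG gs line, g ≠ [] := by
  intro g hg
  by_cases hc : pvP line = true
  · simp only [pvG, hc, if_true] at hg
    rcases List.mem_append.1 hg with h | h
    · exact hne g h
    · simp at h; simp [h]
  · simp only [pvG, hc, if_false, Bool.false_eq_true] at hg
    by_cases he : gs.isEmpty = true
    · simp only [he, if_true] at hg; exact hne g hg
    · simp only [he, if_false, Bool.false_eq_true] at hg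
      rcases List.eq_nil_or_concat gs with rfl | ⟨init, last, rfl⟩
      · exact hne g hg
      · rw [List.concat_eq_append, pvAppendLast_concat] at hg
        rcases List.mem_append.1 hg with h | h
        · refine hne g ?_
          rw [List.concat_eq_append]
          exact List.mem_append.2 (Or.inl h)
        · simp at h; simp [h]

theorem pv_step_commutes (gs : List (List String)) (hne : ∀ g ∈ gs, g ≠ []) (line : String) :
    pvStepA (pvState gs) line = pvState (pvG gs (PySem.Str.strip line)) := by
  by_cases hc : PySem.Str.startswith (PySem.Str.strip line) "instance " = true
  · simp at hc
    rcases List.eq_nil_or_concat gs with rfl | ⟨init, last, rfl⟩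
    · simp only [pvStepA, pvG, pvState, pvP]
      simp [hc, pvJoin_singleton]
    · simp only [List.concat_eq_append, pvStepA, pvG, pvState, pvP]
      simp [hc, pvJoin_singleton, pvF]
  · simp at hc
    rcases List.eq_nil_or_concat gs with rfl | ⟨init, last, rfl⟩
    · simp only [pvStepA, pvG, pvState, pvP]
      simp [hc]
    · have hlast : last ≠ [] := hne last (by simp)
      simp only [List.concat_eq_append, pvStepA, pvG, pvState, pvP]
      simp [hc, pvAppendLast_concat, pvJoin_concat last hlast]

theorem pv_fold_commutes (ls : List String) (gs : List (List String))
    (hne : ∀ g ∈ gs, g ≠ []) :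
    pvFinish (ls.foldl pvStepA (pvState gs)) =
      (ls.foldl (fun acc l => pvG acc (PySem.Str.strip l)) gs).map pvF := by
  induction ls generalizing gs with
  | nil =>
    rcases List.eq_nil_or_concat gs with rfl | ⟨init, last, rfl⟩
    · rfl
    · simp [pvFinish, pvState, pvF]
  | cons l t ih =>
    rw [List.foldl_cons, List.foldl_cons, pv_step_commutes gs hne l]
    exact ih _ (pvG_nonempty gs hne (PySem.Str.strip l))

-- fold grouping with a nonempty accumulator = current block + span recursion
theorem pv_foldG_concat (ls : List String) (init : List (List String)) (g : List String) :
    ls.foldl pvG (init ++ [g]) =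
      init ++ (g ++ ls.takeWhile (fun x => !pvP x)) :: pvBlocks (ls.dropWhile (fun x => !pvP x)) := by
  induction ls generalizing init g with
  | nil => simp [pvBlocks]
  | cons l t ih =>
    by_cases hc : pvP l = true
    · have h1 : pvG (init ++ [g]) l = (init ++ [g]) ++ [[l]] := by simp [pvG, hc]
      rw [List.foldl_cons, h1, ih (init ++ [g]) [l]]
      simp [List.takeWhile_cons, List.dropWhile_cons, hc, pvBlocks]
    · have h1 : pvG (init ++ [g]) l = init ++ [g ++ [l]] := by
        simp [pvG, hc, pvAppendLast_concat]
      rw [List.foldl_cons, h1, ih init (g ++ [l])]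
      simp [List.takeWhile_cons, List.dropWhile_cons, hc]

theorem pv_foldG_nil (ls : List String) :
    ls.foldl pvG [] = pvBlocks (ls.dropWhile (fun x => !pvP x)) := by
  induction ls with
  | nil => simp [pvBlocks]
  | cons l t ih =>
    by_cases hc : pvP l = true
    · have h1 : pvG [] l = [] ++ [[l]] := by simp [pvG, hc]
      rw [List.foldl_cons, h1, pv_foldG_concat]
      simp [List.dropWhile_cons, hc, pvBlocks]
    · have : pvG [] l = [] := by simp [pvG, hc]
      rw [List.foldl_cons, this, ih]
      simp [List.dropWhile, hc]


-- pvIdx facts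
theorem pvIdx_eq_enumerate (ls : List String) (s : Int) :
    ((PySem.List.enumerate ls s).filter (fun p => pvP p.2)).map (·.1) = pvIdx ls s := by
  induction ls generalizing s with
  | nil => simp [pvIdx, PySem.List.enumerate_nil]
  | cons l t ih =>
    rw [PySem.List.enumerate_cons]
    by_cases hc : pvP l = true
    · simp [hc, pvIdx, ih]
    · simp [hc, pvIdx, ih]

theorem pvIdx_shift (ls : List String) (s : Int) :
    pvIdx ls (s + 1) = (pvIdx ls s).map (· + 1) := by
  induction ls generalizing s with
  | nil => simp [pvIdx]
  | cons l t ih => by_cases hc : pvP l = true <;> simp [pvIdx, hc, ih]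

theorem pvIdx_nonneg (ls : List String) (s : Int) (hs : 0 ≤ s) :
    ∀ i ∈ pvIdx ls s, 0 ≤ i := by
  induction ls generalizing s with
  | nil => simp [pvIdx]
  | cons l t ih =>
    intro i hi
    simp only [pvIdx, List.mem_append] at hi
    rcases hi with h | h
    · by_cases hc : pvP l = true <;> simp [hc] at h
      omega
    · exact ih (s + 1) (by omega) i h

theorem pvIdx_nil_iff (ls : List String) (s : Int) (h : pvIdx ls s = []) :
    ls.takeWhile (fun x => !pvP x) = ls ∧ ls.dropWhile (fun x => !pvP x) = [] := by
  induction ls generalizing s with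
  | nil => simp
  | cons l t ih =>
    by_cases hc : pvP l = true
    · simp [pvIdx, hc] at h
    · have h' : pvIdx t (s + 1) = [] := by simpa [pvIdx, hc] using h
      have := ih (s + 1) h'
      simp [List.takeWhile_cons, List.dropWhile_cons, hc, this]

theorem pvIdx_first (ls : List String) (j0 : Int) (rest : List Int)
    (h : pvIdx ls 0 = j0 :: rest) :
    ls.take j0.toNat = ls.takeWhile (fun x => !pvP x) ∧
    ls.drop j0.toNat = ls.dropWhile (fun x => !pvP x) := by
  induction ls generalizing j0 rest with
  | nil => simp [pvIdx] at h
  | cons l t ih =>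
    by_cases hc : pvP l = true
    · simp only [pvIdx, hc, if_pos rfl, List.cons_append, List.nil_append] at h
      obtain ⟨rfl, -⟩ := List.cons.inj h
      simp [List.takeWhile_cons, List.dropWhile_cons, hc]
    · simp only [pvIdx, hc, if_neg (by simp [hc] : ¬ pvP l = true), List.nil_append] at h
      rw [pvIdx_shift] at h
      obtain ⟨j0', rest', hj, rfl, -⟩ :
          ∃ j0' rest', pvIdx t 0 = j0' :: rest' ∧ j0 = j0' + 1 ∧ rest = rest'.map (· + 1) := by
        cases ht : pvIdx t 0 with
        | nil => rw [ht] at h; simp at h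
        | cons a b => rw [ht] at h; simp at h; exact ⟨a, b, rfl, h.1.symm, h.2.symm⟩
      have hnn : 0 ≤ j0' := pvIdx_nonneg t 0 le_rfl j0' (by simp [hj])
      have htn : (j0' + 1).toNat = j0'.toNat + 1 := by omega
      have := ih j0' rest' hj
      simp [List.takeWhile_cons, List.dropWhile_cons, hc, htn, this.1, this.2]

-- B's zip/slice expression over a (stripped) line list
def pvOut (ls : List String) : List String :=
  ((pvIdx ls 0).zip ((pvIdx ls 0).drop 1 ++ [(ls.length : Int)])).map (fun p =>
    pvF (PySem.List.slice ls (some p.1) (some p.2)))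

-- a slice with shifted nonnegative bounds on a cons: drop the head, unshift
theorem pv_slice_shift (l : String) (ls : List String) (a b : Int) (ha : 0 ≤ a) (hb : 0 ≤ b) :
    PySem.List.slice (l :: ls) (some (a + 1)) (some (b + 1)) =
      PySem.List.slice ls (some a) (some b) := by
  have h1 : (a + 1).toNat = a.toNat + 1 := by omega
  have ha1 : (0:Int) ≤ a + 1 := by omega
  have hb1 : (0:Int) ≤ b + 1 := by omega
  rw [PySem.List.slice_toNat (l :: ls) ha1 hb1, PySem.List.slice_toNat ls ha hb,
    h1, List.drop_succ_cons]
  congr 1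
  omega

-- the tail of B's zip on (l :: ls), whose indices are all shifted by one, is pvOut ls
theorem pv_shift_out (l : String) (ls : List String) :
    (((pvIdx ls 0).map (· + 1)).zip (((pvIdx ls 0).map (· + 1)).drop 1 ++
        [((ls.length : Int) + 1)])).map (fun p =>
      pvF (PySem.List.slice (l :: ls) (some p.1) (some p.2))) = pvOut ls := by
  have hd : ((pvIdx ls 0).map (· + 1)).drop 1 ++ [((ls.length : Int) + 1)] =
      ((pvIdx ls 0).drop 1 ++ [(ls.length : Int)]).map (· + 1) := by
    simp [List.map_drop]
  rw [hd, List.zip_map, List.map_map, pvOut]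
  apply List.map_congr_left
  intro p hp
  have hmem := List.of_mem_zip hp
  have ha : 0 ≤ p.1 := pvIdx_nonneg ls 0 le_rfl p.1 hmem.1
  have hb : 0 ≤ p.2 := by
    rcases List.mem_append.1 hmem.2 with h | h
    · exact pvIdx_nonneg ls 0 le_rfl p.2 (List.mem_of_mem_drop h)
    · simp only [List.mem_singleton] at h
      rw [h]; positivity
  simp [Prod.map, pv_slice_shift l ls p.1 p.2 ha hb]

theorem pvOut_eq_blocks (ls : List String) :
    pvOut ls = (pvBlocks (ls.dropWhile (fun x => !pvP x))).map pvF := by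
  induction ls with
  | nil => simp [pvOut, pvIdx, pvBlocks]
  | cons l t ih =>
    have h01 := pvIdx_shift t 0
    norm_num at h01
    by_cases hc : pvP l = true
    · have hidx : pvIdx (l :: t) 0 = 0 :: (pvIdx t 0).map (· + 1) := by
        simp [pvIdx, hc, h01]
      have hdrop : (l :: t).dropWhile (fun x => !pvP x) = l :: t := by
        simp [List.dropWhile_cons, hc]
      rw [hdrop]
      cases hm : pvIdx t 0 with
      | nil =>
        obtain ⟨htake, hdrop2⟩ := pvIdx_nil_iff t 0 hm
        have hslice : PySem.List.slice (l :: t) (some 0) (some ((t.length : Int) + 1)) = l :: t := by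
          have h3 : ((t.length : Int) + 1).toNat = t.length + 1 := by omega
          rw [PySem.List.slice_zero_start, PySem.List.slice_to]
          · rw [h3]
            exact List.take_of_length_le (by simp)
          · positivity
        unfold pvOut
        rw [hidx, hm]
        simp only [List.map_nil, List.drop_succ_cons, List.drop_nil, List.nil_append,
          List.zip_cons_cons, List.zip_nil_right, List.map_cons, List.map_nil, List.length_cons]
        rw [pvBlocks, htake, hdrop2, pvBlocks]
        push_cast
        rw [hslice]
        simp
      | cons j0 rest =>
        have hnn : 0 ≤ j0 := pvIdx_nonneg t 0 le_rfl j0 (by simp [hm])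
        obtain ⟨htake, hdrop2⟩ := pvIdx_first t j0 rest hm
        have hslice : PySem.List.slice (l :: t) (some 0) (some (j0 + 1)) =
            l :: t.take j0.toNat := by
          have h3 : (j0 + 1).toNat = j0.toNat + 1 := by omega
          rw [PySem.List.slice_zero_start, PySem.List.slice_to]
          · rw [h3, List.take_succ_cons]
          · omega
        have htail := pv_shift_out l t
        rw [hm] at htail
        simp only [List.map_cons, List.drop_succ_cons, List.drop_zero, List.cons_append,
          List.zip_cons_cons] at htail
        unfold pvOut
        rw [hidx, hm]
        simp only [List.map_cons, List.drop_succ_cons, List.drop_zero, List.cons_append,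
          List.zip_cons_cons, List.map_cons, List.length_cons]
        rw [pvBlocks]
        push_cast
        push_cast at htail
        rw [hslice, htake, htail, ih, List.map_cons]
    · have hidx : pvIdx (l :: t) 0 = (pvIdx t 0).map (· + 1) := by
        simp [pvIdx, hc, h01]
      have hdrop : (l :: t).dropWhile (fun x => !pvP x) = t.dropWhile (fun x => !pvP x) := by
        simp [List.dropWhile_cons, hc]
      rw [hdrop, ← ih, ← pv_shift_out l t, pvOut, hidx]
      have hlen : ((l :: t).length : Int) = (t.length : Int) + 1 := by
        push_cast [List.length_cons]; ring
      rw [hlen]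

-- ===== VERDICT (by name: the statement is the Claim_ definition above) =====
theorem parse_instances_spec : Claim_equal_parse_instances := by
  intro info_text _
  unfold Spec_parse_instances parse_instances parse_instances_alt
  have hfold : (PySem.Str.splitlines info_text).foldl (fun acc l => pvG acc (PySem.Str.strip l)) [] =
      ((PySem.Str.splitlines info_text).map PySem.Str.strip).foldl pvG [] := by
    rw [List.foldl_map]
  have henum := pvIdx_eq_enumerate ((PySem.Str.splitlines info_text).map PySem.Str.strip) 0
  simp only [pvP] at henum
  have hA' : pvFinish ((PySem.Str.splitlines info_text).foldl pvStepA (pvState [])) =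
      pvOut ((PySem.Str.splitlines info_text).map PySem.Str.strip) := by
    rw [pv_fold_commutes _ [] (by simp), hfold, pv_foldG_nil, ← pvOut_eq_blocks]
  show pvFinish ((PySem.Str.splitlines info_text).foldl pvStepA (pvState [])) = _
  rw [hA']
  unfold pvOut
  rw [← henum]
  simp [pvF, pvJoin]
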